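-- pv_equiv track=rewrite | github.com/rolandoo0/CSVConv | nuevo_programa.py | removeUnusedColumns
-- ===== SOURCE A (Python) =====
-- columnNames = [
--     "order-id",
--     "buyer-phone-number",
--     "product-name",
--     "quantity-to-ship",
--     "recipient-name",
--     "ship-address-1",
--     "ship-address-2",
--     "ship-city",
--     "ship-state",
--     "ship-postal-code",
-- ]
--
-- def removeUnusedColumns(dictionary):
--     columnsToRemove = []
--     for column in dictionary:
--         if column not in columnNames:
--             columnsToRemove.append(column)
--     for column in columnsToRemove:
--         dictionary.pop(column)
--     return dictionary
-- ===== SOURCE B (Python) =====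
-- columnNames = [
--     "order-id",
--     "buyer-phone-number",
--     "product-name",
--     "quantity-to-ship",
--     "recipient-name",
--     "ship-address-1",
--     "ship-address-2",
--     "ship-city",
--     "ship-state",
--     "ship-postal-code",
-- ]
--
-- def removeUnusedColumns(dictionary):
--     filtered = {k: v for k, v in dictionary.items() if k in columnNames}
--     dictionary.clear()
--     dictionary.update(filtered)
--     return dictionary
-- ===== Notes on version B (the rewrite author's own statement) =====
-- stated objective: simpler
-- what changed: Replaces the two-pass collect-keys-then-pop-each deletion with a one-pass comprehension that builds the surviving items directly, then clear()+update() to refill the same dict object in place.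
import Mathlib
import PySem

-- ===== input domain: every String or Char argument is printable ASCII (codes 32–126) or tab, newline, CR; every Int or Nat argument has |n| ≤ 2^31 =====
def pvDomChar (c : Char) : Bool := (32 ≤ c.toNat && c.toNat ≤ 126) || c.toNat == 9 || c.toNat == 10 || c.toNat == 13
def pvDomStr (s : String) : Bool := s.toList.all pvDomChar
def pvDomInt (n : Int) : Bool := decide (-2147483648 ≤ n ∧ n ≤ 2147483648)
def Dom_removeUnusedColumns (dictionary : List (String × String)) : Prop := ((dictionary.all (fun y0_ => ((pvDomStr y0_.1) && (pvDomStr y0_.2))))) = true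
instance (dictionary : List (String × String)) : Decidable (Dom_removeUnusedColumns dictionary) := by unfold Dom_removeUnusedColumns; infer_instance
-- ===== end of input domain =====

-- B replaces A's collect-then-pop two-pass deletion by a single filtering pass (comprehension +
-- clear/update in Python); equivalence of the RETURN value is proved (both Pythons mutate the
-- argument dict to the same final state).

def columnNames : List String :=
  ["order-id", "buyer-phone-number", "product-name", "quantity-to-ship", "recipient-name",
   "ship-address-1", "ship-address-2", "ship-city", "ship-state", "ship-postal-code"]

-- ===== PORT A =====
-- dictionary.pop(column): remove the (unique in a Python dict) entry with that key.
def popKey : List (String × String) → String → List (String × String)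
  | [], _ => []
  | (k, v) :: t, key => if k == key then t else (k, v) :: popKey t key

def removeUnusedColumns (dictionary : List (String × String)) : List (String × String) :=
  -- for column in dictionary: if column not in columnNames: columnsToRemove.append(column)
  let columnsToRemove :=
    dictionary.foldl (fun acc kv => if !(columnNames.contains kv.1) then acc ++ [kv.1] else acc) []
  -- for column in columnsToRemove: dictionary.pop(column)
  columnsToRemove.foldl (fun d column => popKey d column) dictionary

-- ===== PORT B =====
def removeUnusedColumns_alt (dictionary : List (String × String)) : List (String × String) :=
  -- {k: v for k, v in dictionary.items() if k in columnNames}; clear(); update(filtered)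
  dictionary.filter (fun kv => columnNames.contains kv.1)

-- ===== PRECONDITION & SPEC =====
def Spec_removeUnusedColumns (dictionary : List (String × String)) (out : List (String × String)) : Prop := out = removeUnusedColumns_alt dictionary
instance (dictionary : List (String × String)) (out : List (String × String)) : Decidable (Spec_removeUnusedColumns dictionary out) := by unfold Spec_removeUnusedColumns; infer_instance

-- ===== CLAIM (what is proved, stated in full; the proofs are below) =====
def Claim_equal_removeUnusedColumns : Prop := ∀ (dictionary : List (String × String)), Dom_removeUnusedColumns dictionary → Spec_removeUnusedColumns dictionary (removeUnusedColumns dictionary)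

-- ===== LEMMAS AND PROOFS =====

theorem popKey_cons_of_ne (k key : String) (v : String) (t : List (String × String))
    (h : (k == key) = false) : popKey ((k, v) :: t) key = (k, v) :: popKey t key := by
  simp [popKey, h]

theorem popKey_cons_self (k : String) (v : String) (t : List (String × String)) :
    popKey ((k, v) :: t) k = t := by
  simp [popKey]

-- the collected removal list is exactly the keys of the entries filtered out, in order
theorem collect_eq (p : String × String → Bool) (l : List (String × String)) (acc : List String) :
    l.foldl (fun acc kv => if !(p kv) then acc ++ [kv.1] else acc) acc
      = acc ++ (l.filter (fun kv => !(p kv))).map Prod.fst := by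
  induction l generalizing acc with
  | nil => simp
  | cons kv t ih =>
      rw [List.foldl_cons, ih, List.filter_cons]
      cases h : p kv with
      | true => simp
      | false => simp [h]
  
-- popping a list of keys all failing the key predicate leaves a passing head intact
theorem foldl_popKey_cons_good (p : String → Bool) (k v : String)
    (t : List (String × String)) (ks : List String)
    (hk : p k = true) (hks : ∀ key ∈ ks, p key = false) :
    ks.foldl (fun d column => popKey d column) ((k, v) :: t)
      = (k, v) :: ks.foldl (fun d column => popKey d column) t := by
  induction ks generalizing t with
  | nil => rfl
  | cons key rest ih =>
      have hne : (k == key) = false := by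
        have hkey := hks key (by simp)
        cases hbe : (k == key) with
        | false => rfl
        | true =>
            exfalso
            have : k = key := by simpa using hbe
            rw [this, hkey] at hk
            exact Bool.false_ne_true hk
      rw [List.foldl_cons, popKey_cons_of_ne k key v t hne,
        ih (popKey t key) (fun key' h' => hks key' (by simp [h']))]
      rfl

-- main invariant: popping exactly the collected bad keys is filtering
theorem pops_eq_filter (p : String → Bool) (l : List (String × String)) :
    ((l.filter (fun kv => !(p kv.1))).map Prod.fst).foldl
        (fun d column => popKey d column) l
      = l.filter (fun kv => p kv.1) := by
  induction l with
  | nil => rfl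
  | cons kv t ih =>
      obtain ⟨k, v⟩ := kv
      rw [List.filter_cons, List.filter_cons]
      cases h : p k with
      | true =>
          have hbad : ∀ key ∈ (t.filter (fun kv => !(p kv.1))).map Prod.fst,
              p key = false := by
            intro key hkey
            simp only [List.mem_map, List.mem_filter] at hkey
            obtain ⟨q, ⟨_, hq⟩, rfl⟩ := hkey
            simpa using hq
          have hg := foldl_popKey_cons_good p k v t
            ((t.filter (fun kv => !(p kv.1))).map Prod.fst) h hbad
          simp [hg, ih]
      | false =>
          simp [popKey_cons_self, ih]

-- ===== VERDICT (by name: the statement is the Claim_ definition above) =====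
theorem removeUnusedColumns_spec : Claim_equal_removeUnusedColumns := by
  intro dictionary _
  unfold Spec_removeUnusedColumns removeUnusedColumns removeUnusedColumns_alt
  rw [collect_eq (fun kv => columnNames.contains kv.1) dictionary []]
  simpa using pops_eq_filter (fun k => columnNames.contains k) dictionary
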